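-- pv_equiv track=rewrite | github.com/OnYyon/EGE | PRO100EGE/task19-21/subtraction/task9.py | f
-- ===== SOURCE A (Python) =====
-- def f(x, pos, wins):
--     if x == 0:
--         return pos in wins
--     if pos > max(wins):
--         return 0
--
--     moves = list()
--     if x - 3 >= 0:
--         moves.append(f(x - 3, pos + 1, wins))
--     if x - 4 >= 0:
--         moves.append(f(x - 4, pos + 1, wins))
--     if x // 2 >= 0:
--         moves.append(f(x // 2, pos + 1, wins))
--
--     if pos % 2 != max(wins) % 2:
--         return any(moves)
--     return all(moves)
-- ===== SOURCE B (Python) =====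
-- def f(x, pos, wins):
--     if x == 0:
--         return pos in wins
--     m = max(wins)
--     memo = {}
--
--     def win(x, pos):
--         if x == 0:
--             return pos in wins
--         if pos > m:
--             return False
--         key = (x, pos)
--         if key not in memo:
--             opts = []
--             if x >= 3:
--                 opts.append(win(x - 3, pos + 1))
--             if x >= 4:
--                 opts.append(win(x - 4, pos + 1))
--             if x // 2 >= 0:
--                 opts.append(win(x // 2, pos + 1))
--             memo[key] = any(opts) if pos % 2 != m % 2 else all(opts)
--         return memo[key]
--
--     return win(x, pos)
-- ===== Notes on version B (the rewrite author's own statement) =====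
-- stated objective: faster
-- what changed: B memoizes the game evaluation on the (x, pos) state in a dict, turning A's plain triple-branching recursion (exponential in the depth max(wins)-pos) into one evaluation per reachable state; Pre_ excludes the inputs where A raises on max([]) or returns the int 0 instead of a bool.
-- outside the precondition, e.g. on f(1, 1, [0]): A returns 0, B returns False
import Mathlib
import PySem

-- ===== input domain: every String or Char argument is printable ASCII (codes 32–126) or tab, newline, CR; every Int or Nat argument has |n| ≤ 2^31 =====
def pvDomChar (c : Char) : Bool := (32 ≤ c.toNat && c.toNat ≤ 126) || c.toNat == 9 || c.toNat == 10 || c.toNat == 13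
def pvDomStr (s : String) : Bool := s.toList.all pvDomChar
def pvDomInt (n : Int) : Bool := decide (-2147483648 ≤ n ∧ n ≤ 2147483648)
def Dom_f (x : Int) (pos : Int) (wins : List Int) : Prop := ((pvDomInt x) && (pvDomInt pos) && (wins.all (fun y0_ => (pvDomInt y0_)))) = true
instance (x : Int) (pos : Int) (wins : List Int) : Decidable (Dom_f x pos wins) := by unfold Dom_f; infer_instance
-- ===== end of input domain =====

-- B memoizes the recursion on the (x, pos) state (asymptotically faster, measured);
-- Python A returns the int 0 where B returns False (equal values in Python); both raise on empty wins with x ≠ 0 (excluded by Pre_).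

-- ===== PORT A =====
def f (x : Int) (pos : Int) (wins : List Int) : Bool :=
  if x == 0 then wins.contains pos
  else
    match hm : PySem.List.max? wins (fun y => y) with
    | none => false  -- Python raises ValueError on max([]); excluded by Pre_f
    | some m =>
      if hp : pos > m then false
      else
        let moves : List Bool :=
          (if x - 3 ≥ 0 then [f (x - 3) (pos + 1) wins] else []) ++
          (if x - 4 ≥ 0 then [f (x - 4) (pos + 1) wins] else []) ++
          (if PySem.Int.floordiv x 2 ≥ 0 then [f (PySem.Int.floordiv x 2) (pos + 1) wins] else [])
        if PySem.Int.mod pos 2 != PySem.Int.mod m 2 then moves.any id else moves.all id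
termination_by (((PySem.List.max? wins (fun y => y)).getD pos) - pos + 1).toNat
decreasing_by all_goals (simp [hm]; omega)

-- ===== PORT B =====
-- memoized evaluator: returns the value and the updated memo table
def fBgo (wins : List Int) (m : Int) (x : Int) (pos : Int)
    (memo : PySem.Dict (Int × Int) Bool) : Bool × PySem.Dict (Int × Int) Bool :=
  if x == 0 then (wins.contains pos, memo)
  else if hp : pos > m then (false, memo)
  else
    match memo.get? (x, pos) with
    | some v => (v, memo)
    | none =>
      let p1 : List Bool × PySem.Dict (Int × Int) Bool :=
        if x ≥ 3 then
          let r := fBgo wins m (x - 3) (pos + 1) memo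
          ([r.1], r.2)
        else ([], memo)
      let p2 : List Bool × PySem.Dict (Int × Int) Bool :=
        if x ≥ 4 then
          let r := fBgo wins m (x - 4) (pos + 1) p1.2
          (p1.1 ++ [r.1], r.2)
        else p1
      let p3 : List Bool × PySem.Dict (Int × Int) Bool :=
        if PySem.Int.floordiv x 2 ≥ 0 then
          let r := fBgo wins m (PySem.Int.floordiv x 2) (pos + 1) p2.2
          (p2.1 ++ [r.1], r.2)
        else p2
      let v := if PySem.Int.mod pos 2 != PySem.Int.mod m 2 then p3.1.any id else p3.1.all id
      (v, p3.2.insert (x, pos) v)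
termination_by (m - pos + 1).toNat
decreasing_by all_goals omega

def f_alt (x : Int) (pos : Int) (wins : List Int) : Bool :=
  if x == 0 then wins.contains pos
  else
    match PySem.List.max? wins (fun y => y) with
    | none => false  -- B's max(wins) raises too; excluded by Pre_f
    | some m => (fBgo wins m x pos PySem.Dict.empty).1

-- ===== PRECONDITION & SPEC =====
-- Pre_f excludes, for x ≠ 0, the inputs with wins = [] (Python A and B raise ValueError on max([]))
-- and those with pos > max(wins), where Python A returns the int 0 instead of a bool.
def Pre_f (x : Int) (pos : Int) (wins : List Int) : Prop := x = 0 ∨ ∃ w ∈ wins, pos ≤ w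
instance (x : Int) (pos : Int) (wins : List Int) : Decidable (Pre_f x pos wins) := by unfold Pre_f; infer_instance
def pvWitness_f : Int × Int × List Int := (5, 0, [3])

def Spec_f (x : Int) (pos : Int) (wins : List Int) (out : Bool) : Prop := out = f_alt x pos wins
instance (x : Int) (pos : Int) (wins : List Int) (out : Bool) : Decidable (Spec_f x pos wins out) := by unfold Spec_f; infer_instance

-- ===== CLAIM (what is proved, stated in full; the proofs are below) =====
def Claim_equal_f : Prop := ∀ (x : Int) (pos : Int) (wins : List Int), Dom_f x pos wins → Pre_f x pos wins → Spec_f x pos wins (f x pos wins)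

-- ===== LEMMAS AND PROOFS =====


def Good (wins : List Int) (memo : PySem.Dict (Int × Int) Bool) : Prop :=
  ∀ xp v, memo.get? xp = some v → v = f xp.1 xp.2 wins

theorem f_gt (x pos : Int) (wins : List Int) (m : Int) (hx : ¬ (x == 0) = true)
    (hm : PySem.List.max? wins (fun y => y) = some m) (hp : pos > m) :
    f x pos wins = false := by
  rw [f, if_neg hx]
  split
  · rfl
  · rename_i m' heq
    rw [hm] at heq; injection heq with h; subst h
    rw [dif_pos hp]

theorem f_step (x pos : Int) (wins : List Int) (m : Int) (hx : ¬ (x == 0) = true)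
    (hm : PySem.List.max? wins (fun y => y) = some m) (hp : ¬ pos > m) :
    f x pos wins =
      (if (PySem.Int.mod pos 2 != PySem.Int.mod m 2) = true
        then ((if x - 3 ≥ 0 then [f (x - 3) (pos + 1) wins] else []) ++
              (if x - 4 ≥ 0 then [f (x - 4) (pos + 1) wins] else []) ++
              (if PySem.Int.floordiv x 2 ≥ 0 then [f (PySem.Int.floordiv x 2) (pos + 1) wins] else [])).any id
        else ((if x - 3 ≥ 0 then [f (x - 3) (pos + 1) wins] else []) ++
              (if x - 4 ≥ 0 then [f (x - 4) (pos + 1) wins] else []) ++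
              (if PySem.Int.floordiv x 2 ≥ 0 then [f (PySem.Int.floordiv x 2) (pos + 1) wins] else [])).all id) := by
  conv_lhs => rw [f]
  rw [if_neg hx]
  split
  · rename_i heq; rw [hm] at heq; cases heq
  · rename_i m' heq
    rw [hm] at heq; injection heq with h; subst h
    rw [dif_neg hp]

theorem fBgo_correct (wins : List Int) (m : Int)
    (hm : PySem.List.max? wins (fun y => y) = some m) :
    ∀ (x pos : Int) (memo : PySem.Dict (Int × Int) Bool), Good wins memo →
      (fBgo wins m x pos memo).1 = f x pos wins ∧ Good wins (fBgo wins m x pos memo).2 := by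
  intro x pos memo
  induction x, pos, memo using fBgo.induct wins m with
  | case1 x pos memo hx =>
    intro hg
    rw [fBgo, f]
    simp only [if_pos hx]
    exact ⟨trivial, hg⟩
  | case2 x pos memo hx hp =>
    intro hg
    rw [fBgo]
    simp only [if_neg hx, dif_pos hp]
    exact ⟨(f_gt x pos wins m hx hm hp).symm, hg⟩
  | case3 x pos memo hx hp v hv =>
    intro hg
    rw [fBgo]
    simp only [if_neg hx, dif_neg hp, hv]
    exact ⟨hg (x, pos) v hv, hg⟩
  | case4 x pos memo hx hp hnone p1d p2d ihA ihB ihB' ihC =>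
    intro hg
    rw [fBgo]
    simp only [if_neg hx, dif_neg hp, hnone]
    rw [f_step x pos wins m hx hm hp]
    set q1 : List Bool × PySem.Dict (Int × Int) Bool :=
      (if x ≥ 3 then ([(fBgo wins m (x - 3) (pos + 1) memo).1], (fBgo wins m (x - 3) (pos + 1) memo).2)
       else ([], memo)) with hq1
    set q2 : List Bool × PySem.Dict (Int × Int) Bool :=
      (if x ≥ 4 then (q1.1 ++ [(fBgo wins m (x - 4) (pos + 1) q1.2).1], (fBgo wins m (x - 4) (pos + 1) q1.2).2)
       else q1) with hq2
    set q3 : List Bool × PySem.Dict (Int × Int) Bool :=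
      (if PySem.Int.floordiv x 2 ≥ 0 then
         (q2.1 ++ [(fBgo wins m (PySem.Int.floordiv x 2) (pos + 1) q2.2).1],
          (fBgo wins m (PySem.Int.floordiv x 2) (pos + 1) q2.2).2)
       else q2) with hq3
    have eq1 : p1d = q1 := rfl
    have eq2 : p2d = q2 := rfl
    rw [eq1] at ihB
    rw [eq2] at ihC
    have H1 : q1.1 = (if x - 3 ≥ 0 then [f (x - 3) (pos + 1) wins] else []) ∧ Good wins q1.2 := by
      rw [hq1]
      by_cases h3 : x ≥ 3
      · rw [if_pos h3, if_pos (show x - 3 ≥ 0 by omega)]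
        obtain ⟨e, g⟩ := ihA hg
        exact ⟨by rw [e], g⟩
      · rw [if_neg h3, if_neg (show ¬ x - 3 ≥ 0 by omega)]
        exact ⟨rfl, hg⟩
    have H2 : q2.1 = q1.1 ++ (if x - 4 ≥ 0 then [f (x - 4) (pos + 1) wins] else []) ∧ Good wins q2.2 := by
      rw [hq2]
      by_cases h4 : x ≥ 4
      · rw [if_pos h4, if_pos (show x - 4 ≥ 0 by omega)]
        obtain ⟨e, g⟩ := ihB H1.2
        exact ⟨by rw [e], g⟩
      · rw [if_neg h4, if_neg (show ¬ x - 4 ≥ 0 by omega)]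
        exact ⟨by simp, H1.2⟩
    have H3 : q3.1 = q2.1 ++ (if PySem.Int.floordiv x 2 ≥ 0 then [f (PySem.Int.floordiv x 2) (pos + 1) wins] else []) ∧ Good wins q3.2 := by
      rw [hq3]
      by_cases h2 : PySem.Int.floordiv x 2 ≥ 0
      · rw [if_pos h2, if_pos h2]
        obtain ⟨e, g⟩ := ihC H2.2
        exact ⟨by rw [e], g⟩
      · rw [if_neg h2, if_neg h2]
        exact ⟨by simp, H2.2⟩
    have HL : q3.1 = ((if x - 3 ≥ 0 then [f (x - 3) (pos + 1) wins] else []) ++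
        (if x - 4 ≥ 0 then [f (x - 4) (pos + 1) wins] else []) ++
        (if PySem.Int.floordiv x 2 ≥ 0 then [f (PySem.Int.floordiv x 2) (pos + 1) wins] else [])) := by
      rw [H3.1, H2.1, H1.1]
    constructor
    · simp only [HL]
    · intro xp v' hv'
      rw [PySem.Dict.get?_insert] at hv'
      by_cases hxp : xp = (x, pos)
      · rw [if_pos hxp] at hv'
        injection hv' with hv''
        subst hxp
        rw [← hv'', f_step x pos wins m hx hm hp, HL]
      · rw [if_neg hxp] at hv'
        exact H3.2 xp v' hv'

theorem good_empty (wins : List Int) : Good wins PySem.Dict.empty := by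
  intro xp v h
  rw [PySem.Dict.get?_empty] at h
  cases h

-- ===== VERDICT (by name: the statement is the Claim_ definition above) =====
theorem f_spec : Claim_equal_f := by
  intro x pos wins _ hpre
  unfold Spec_f f_alt
  by_cases hx : (x == 0) = true
  · rw [f, if_pos hx, if_pos hx]
  · rw [if_neg hx]
    have hne : wins ≠ [] := by
      rcases hpre with h0 | ⟨w, hw, _⟩
      · exact absurd (by simp [h0]) hx
      · exact fun h => by simp [h] at hw
    obtain ⟨m, hm⟩ : ∃ m, PySem.List.max? wins (fun y => y) = some m := by
      cases h : PySem.List.max? wins (fun y => y) with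
      | none => exact absurd ((PySem.List.max?_eq_none_iff _ _).mp h) hne
      | some m => exact ⟨m, rfl⟩
    rw [hm]
    exact ((fBgo_correct wins m hm x pos PySem.Dict.empty (good_empty wins)).1).symm
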